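-- pv_equiv track=rewrite | github.com/bubblemans/network-serializer | serializer.py | findFirstBitInFormatString
-- ===== SOURCE A (Python) =====
-- def findFirstBitInFormatString(inString):
--     '''
--     # finds if there's is an 'u' in the given string
--     # if yes, split string on that letter plus any preceding numbers and return all three parts
--     # otherwise return input string
--     '''
--
--     currentString = inString
--     rightIndex = currentString.find('u')
--     leftIndex = rightIndex
--     if rightIndex != -1:
--         while leftIndex > 0 and currentString[leftIndex-1].isdigit():
--             leftIndex -= 1
--     else:
--         return ("", "", currentString)
--
--     # splits input string into three strings:
--     #   * the string prior to the split string
--     #   * the split string, which contains the 'F' character along with an optional immediately preceding number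
--     #   * the remainder of the string
--     return (currentString[:leftIndex], currentString[leftIndex:rightIndex+1], currentString[rightIndex+1:])
-- ===== SOURCE B (Python) =====
-- def findFirstBitInFormatString(inString):
--     # single forward pass: track the start of the current digit run; split at the first 'u'
--     run = 0
--     for i, ch in enumerate(inString):
--         if ch == 'u':
--             return (inString[:run], inString[run:i+1], inString[i+1:])
--         if not ch.isdigit():
--             run = i + 1
--     return ("", "", inString)
-- ===== Notes on version B (the rewrite author's own statement) =====
-- stated objective: alternative
-- what changed: A calls find('u') then walks backward over preceding digits; B makes a single forward pass that tracks the start of the current digit run and splits at the first 'u'.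
import Mathlib
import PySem

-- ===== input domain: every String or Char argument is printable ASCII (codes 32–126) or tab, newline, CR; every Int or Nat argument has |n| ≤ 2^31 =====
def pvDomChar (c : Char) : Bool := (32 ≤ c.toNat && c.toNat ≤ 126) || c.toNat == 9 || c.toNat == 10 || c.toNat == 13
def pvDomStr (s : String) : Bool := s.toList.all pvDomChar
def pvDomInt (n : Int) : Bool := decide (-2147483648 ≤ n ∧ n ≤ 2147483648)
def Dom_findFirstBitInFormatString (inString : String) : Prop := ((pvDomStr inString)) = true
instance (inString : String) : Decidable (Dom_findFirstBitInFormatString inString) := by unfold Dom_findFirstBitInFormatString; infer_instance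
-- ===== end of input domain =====

-- B replaces A's find-then-walk-backward with one forward scan tracking the start of the
-- current digit run (objective: alternative single-pass decomposition; same cost).

-- ===== PORT A =====
-- A's backward while-loop: decrement leftIndex while the previous character is a digit
-- (the Python index access s[leftIndex-1] is always in range here, so getD is exact).
def pvBackA (cs : List Char) : Nat → Nat
  | 0 => 0
  | l + 1 => if PySem.Chars.isdigit (cs.getD l ' ') then pvBackA cs l else l + 1

def findFirstBitInFormatString (inString : String) : String × String × String :=
  let cs := inString.toList
  let rightIndex := PySem.Chars.find cs ['u']
  if rightIndex ≠ -1 then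
    let leftIndex := pvBackA cs rightIndex.toNat
    (String.ofList (PySem.List.slice cs none (some (leftIndex : Int))),
     String.ofList (PySem.List.slice cs (some (leftIndex : Int)) (some (rightIndex + 1))),
     String.ofList (PySem.List.slice cs (some (rightIndex + 1)) none))
  else ("", "", inString)

-- ===== PORT B =====
-- B's forward scan: `i` is the current index, `run` the start of the current digit run;
-- returns (run, i) at the first 'u', none if there is no 'u'.
def pvScanB : List Char → Nat → Nat → Option (Nat × Nat)
  | [], _, _ => none
  | c :: rest, i, run =>
    if c = 'u' then some (run, i)
    else if PySem.Chars.isdigit c then pvScanB rest (i + 1) run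
    else pvScanB rest (i + 1) (i + 1)

def findFirstBitInFormatString_alt (inString : String) : String × String × String :=
  let cs := inString.toList
  match pvScanB cs 0 0 with
  | some (run, i) =>
    (String.ofList (PySem.List.slice cs none (some (run : Int))),
     String.ofList (PySem.List.slice cs (some (run : Int)) (some ((i : Int) + 1))),
     String.ofList (PySem.List.slice cs (some ((i : Int) + 1)) none))
  | none => ("", "", inString)

-- ===== PRECONDITION & SPEC =====
def Spec_findFirstBitInFormatString (inString : String) (out : String × String × String) : Prop := out = findFirstBitInFormatString_alt inString
instance (inString : String) (out : String × String × String) : Decidable (Spec_findFirstBitInFormatString inString out) := by unfold Spec_findFirstBitInFormatString; infer_instance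

-- ===== CLAIM (what is proved, stated in full; the proofs are below) =====
def Claim_equal_findFirstBitInFormatString : Prop := ∀ (inString : String), Dom_findFirstBitInFormatString inString → Spec_findFirstBitInFormatString inString (findFirstBitInFormatString inString)

-- ===== LEMMAS AND PROOFS =====

-- index of the first 'u' in a list
def pvFirstU : List Char → Option Nat
  | [] => none
  | c :: rest => if c = 'u' then some 0 else (pvFirstU rest).map (· + 1)

-- trailing-digit-run fold: D cs a = length of the maximal all-digit suffix (a is carried in)
def pvD (cs : List Char) (a : Nat) : Nat :=
  cs.foldl (fun a c => if PySem.Chars.isdigit c then a + 1 else 0) a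

theorem pvFirstU_none (cs : List Char) : pvFirstU cs = none ↔ 'u' ∉ cs := by
  induction cs with
  | nil => simp [pvFirstU]
  | cons c rest ih =>
    by_cases hc : c = 'u'
    · subst hc; simp [pvFirstU]
    · simp [pvFirstU, hc, ih, Ne.symm hc]

theorem pvFirstU_some (cs : List Char) (j : Nat) (h : pvFirstU cs = some j) :
    j < cs.length ∧ cs[j]? = some 'u' ∧ ∀ m < j, cs[m]? ≠ some 'u' := by
  induction cs generalizing j with
  | nil => simp [pvFirstU] at h
  | cons c rest ih =>
    by_cases hc : c = 'u'
    · subst hc; simp [pvFirstU] at h; subst h; simp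
    · simp only [pvFirstU, if_neg hc, Option.map_eq_some_iff] at h
      obtain ⟨j', hj', rfl⟩ := h
      obtain ⟨h1, h2, h3⟩ := ih j' hj'
      refine ⟨by simpa using Nat.succ_lt_succ h1, by simpa using h2, ?_⟩
      intro m hm
      cases m with
      | zero => simpa using hc
      | succ m => simpa using h3 m (by omega)

theorem pvD_le (cs : List Char) (a : Nat) : pvD cs a ≤ a + cs.length := by
  induction cs generalizing a with
  | nil => simp [pvD]
  | cons c rest ih =>
    have h : pvD (c :: rest) a = pvD rest (if PySem.Chars.isdigit c then a + 1 else 0) := rfl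
    rw [h]
    split_ifs
    · have := ih (a + 1); simp at *; omega
    · have := ih 0; simp at *; omega

theorem pvScanB_spec (cs : List Char) (i run : Nat) (h : run ≤ i) :
    pvScanB cs i run = (pvFirstU cs).map (fun j => (i + j - pvD (cs.take j) (i - run), i + j)) := by
  induction cs generalizing i run with
  | nil => simp [pvScanB, pvFirstU]
  | cons c rest ih =>
    by_cases hc : c = 'u'
    · subst hc
      simp [pvScanB, pvFirstU, pvD]
      omega
    · have hD : ∀ (l : List Char) (a : Nat),
          pvD (c :: l) a = pvD l (if PySem.Chars.isdigit c then a + 1 else 0) := fun _ _ => rfl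
      by_cases hd : PySem.Chars.isdigit c
      · rw [show pvScanB (c :: rest) i run = pvScanB rest (i + 1) run by simp [pvScanB, hc, hd]]
        rw [ih (i + 1) run (by omega)]
        cases hfu : pvFirstU rest with
        | none => simp [pvFirstU, hc, hfu]
        | some j =>
          simp only [pvFirstU, if_neg hc, hfu, Option.map_some, List.take_succ_cons]
          rw [hD, if_pos hd, show i - run + 1 = i + 1 - run by omega,
            show i + 1 + j = i + (j + 1) by omega]
      · rw [show pvScanB (c :: rest) i run = pvScanB rest (i + 1) (i + 1) by simp [pvScanB, hc, hd]]
        rw [ih (i + 1) (i + 1) (by omega)]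
        cases hfu : pvFirstU rest with
        | none => simp [pvFirstU, hc, hfu]
        | some j =>
          simp only [pvFirstU, if_neg hc, hfu, Option.map_some, List.take_succ_cons]
          rw [hD, if_neg hd, show i + 1 - (i + 1) = 0 by omega,
            show i + 1 + j = i + (j + 1) by omega]

theorem pvBackA_spec (cs : List Char) (k : Nat) (hk : k ≤ cs.length) :
    pvBackA cs k = k - pvD (cs.take k) 0 := by
  induction k with
  | zero => simp [pvBackA, pvD]
  | succ l ih =>
    have hl : l < cs.length := by omega
    have hget : cs.getD l ' ' = cs[l] := List.getD_eq_getElem cs ' ' hl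
    have htake : cs.take (l + 1) = cs.take l ++ [cs[l]] := by
      rw [List.take_add_one]; simp [List.getElem?_eq_getElem hl]
    have happ : ∀ a : Nat, pvD (cs.take l ++ [cs[l]]) a =
        if PySem.Chars.isdigit cs[l] then pvD (cs.take l) a + 1 else 0 := by
      intro a; simp only [pvD, List.foldl_append, List.foldl_cons, List.foldl_nil]
    have hle : pvD (cs.take l) 0 ≤ l := by
      have := pvD_le (cs.take l) 0
      simpa [List.length_take, Nat.min_eq_left (le_of_lt hl)] using this
    rw [show pvBackA cs (l + 1) =
        if PySem.Chars.isdigit (cs.getD l ' ') then pvBackA cs l else l + 1 from rfl]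
    rw [hget, htake, happ]
    split_ifs with hd
    · rw [ih (by omega)]; omega
    · omega

theorem singleton_prefix_iff (c : Char) (l : List Char) : [c] <+: l ↔ l[0]? = some c := by
  cases l with
  | nil => simp
  | cons d t => simp [List.cons_prefix_cons, eq_comm]

theorem find_eq_pvFirstU (cs : List Char) :
    PySem.Chars.find cs ['u'] = match pvFirstU cs with | none => -1 | some j => (j : Int) := by
  cases hfu : pvFirstU cs with
  | none =>
    have hmem : 'u' ∉ cs := (pvFirstU_none cs).mp hfu
    show PySem.Chars.find cs ['u'] = -1
    exact (PySem.Chars.find_eq_neg_one_iff cs ['u']).mpr (fun hinf => hmem (hinf.subset (by simp)))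
  | some j =>
    show PySem.Chars.find cs ['u'] = (j : Int)
    obtain ⟨hj, hget, hmin⟩ := pvFirstU_some cs j hfu
    have hpre : [ 'u' ] <+: cs.drop j := by
      rw [singleton_prefix_iff]
      simpa using hget
    have hinf : [ 'u' ] <:+: cs := by
      obtain ⟨t, ht⟩ := hpre
      exact ⟨cs.take j, t, by rw [List.append_assoc, ht, List.take_append_drop]⟩
    have hne : PySem.Chars.find cs ['u'] ≠ -1 := (PySem.Chars.find_ne_neg_one_iff cs ['u']).mpr hinf
    have hnn : 0 ≤ PySem.Chars.find cs ['u'] := by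
      have := PySem.Chars.neg_one_le_find cs ['u']
      omega
    obtain ⟨hp, hm⟩ := PySem.Chars.find_spec (s := cs) (sub := ['u']) hnn
    rw [singleton_prefix_iff] at hp
    simp only [List.getElem?_drop, Nat.add_zero] at hp
    have hfle : (PySem.Chars.find cs ['u']).toNat = j := by
      rcases Nat.lt_trichotomy (PySem.Chars.find cs ['u']).toNat j with h | h | h
      · exact absurd hp (hmin _ h)
      · exact h
      · exfalso
        apply hm j h
        rw [singleton_prefix_iff]
        simpa using hget
    omega

-- ===== VERDICT (by name: the statement is the Claim_ definition above) =====
theorem findFirstBitInFormatString_spec : Claim_equal_findFirstBitInFormatString := by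
  intro s _
  unfold Spec_findFirstBitInFormatString findFirstBitInFormatString findFirstBitInFormatString_alt
  simp only [find_eq_pvFirstU, pvScanB_spec s.toList 0 0 (le_refl 0)]
  cases hfu : pvFirstU s.toList with
  | none => simp
  | some j =>
    obtain ⟨hj, _, _⟩ := pvFirstU_some s.toList j hfu
    simp only [Option.map_some]
    rw [if_pos (by simp), pvBackA_spec s.toList ((j : Int)).toNat (by rw [Int.toNat_natCast]; omega)]
    simp
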